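-- pv_equiv track=rewrite | github.com/philipposk/Daisy--AI-Assistant- | Daisy -AI Assistant- 0.3/agent-controller/simple-controller.py | parse_run_instruction
-- ===== SOURCE A (Python) =====
-- from typing import Dict, Optional
--
-- def parse_run_instruction(text: str) -> Dict:
--     """Parse what needs to be executed"""
--     instruction = {
--         "type": "unknown",
--         "app": None,
--         "action": None,
--         "command": None
--     }
--
--     text_lower = text.lower()
--
--     # Detect Xcode
--     if "xcode" in text_lower or ".xcodeproj" in text_lower or "ios" in text_lower:
--         instruction["type"] = "xcode"
--         instruction["app"] = "Xcode"
--         if "build" in text_lower: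
--             instruction["action"] = "build"
--         elif "run" in text_lower or "execute" in text_lower:
--             instruction["action"] = "run"
--         else:
--             instruction["action"] = "run"  # Default to run
--
--     # Detect Android Studio
--     elif "android" in text_lower or "gradle" in text_lower:
--         instruction["type"] = "android"
--         instruction["app"] = "Android Studio"
--         if "build" in text_lower:
--             instruction["action"] = "build"
--         elif "run" in text_lower:
--             instruction["action"] = "run"
--
--     # Detect terminal command
--     elif any(word in text_lower for word in ["terminal", "command", "bash", "shell", "npm", "python", "node"]):
--         instruction["type"] = "terminal"
--         # Try to extract command
--         if "npm" in text_lower: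
--             instruction["command"] = "npm start"
--         elif "python" in text_lower or "python3" in text_lower:
--             instruction["command"] = "python3"
--         elif "node" in text_lower:
--             instruction["command"] = "node"
--         else:
--             instruction["command"] = None
--
--     return instruction
-- ===== SOURCE B (Python) =====
-- from typing import Dict, Optional
--
-- _KEYWORDS = ["xcode", ".xcodeproj", "ios", "android", "gradle",
--              "terminal", "command", "bash", "shell", "npm",
--              "python", "node", "build", "run", "execute"]
--
-- def parse_run_instruction(text: str) -> Dict:
--     """Parse what needs to be executed"""
--     t = text.lower()
--     # Single left-to-right sweep over the text: at each position record every
--     # keyword that starts there, so all later decisions are set-membership tests.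
--     found = set()
--     for i in range(len(t)):
--         for kw in _KEYWORDS:
--             if t.startswith(kw, i):
--                 found.add(kw)
--
--     instruction = {"type": "unknown", "app": None, "action": None, "command": None}
--     if any(k in found for k in ("xcode", ".xcodeproj", "ios")):
--         instruction["type"] = "xcode"
--         instruction["app"] = "Xcode"
--         instruction["action"] = "build" if "build" in found else "run"
--     elif any(k in found for k in ("android", "gradle")):
--         instruction["type"] = "android"
--         instruction["app"] = "Android Studio"
--         if "build" in found:
--             instruction["action"] = "build"
--         elif "run" in found:
--             instruction["action"] = "run"
--     elif any(k in found for k in ("terminal", "command", "bash", "shell", "npm", "python", "node")):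
--         instruction["type"] = "terminal"
--         instruction["command"] = ("npm start" if "npm" in found
--                                   else "python3" if "python" in found
--                                   else "node" if "node" in found
--                                   else None)
--     return instruction
-- ===== Notes on version B (the rewrite author's own statement) =====
-- stated objective: alternative
-- what changed: Replaces A's fifteen independent whole-text substring scans with one left-to-right sweep over the text that builds a set of all keywords found at each position, after which every decision is an O(1)-style set-membership test instead of a fresh scan.
import Mathlib
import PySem

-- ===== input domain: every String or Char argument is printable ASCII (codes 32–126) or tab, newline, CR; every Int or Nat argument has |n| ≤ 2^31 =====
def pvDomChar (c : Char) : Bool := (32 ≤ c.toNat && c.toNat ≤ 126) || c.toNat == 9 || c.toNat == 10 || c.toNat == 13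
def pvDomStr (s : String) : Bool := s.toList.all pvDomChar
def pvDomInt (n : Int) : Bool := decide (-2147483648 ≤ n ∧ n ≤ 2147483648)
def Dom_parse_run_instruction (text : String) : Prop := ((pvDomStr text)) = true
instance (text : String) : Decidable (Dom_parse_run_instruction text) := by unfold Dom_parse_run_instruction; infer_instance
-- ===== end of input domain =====

-- B replaces A's fifteen independent 'kw in text' scans with one sweep over the text collecting all
-- keywords found at each position into a set, then decides from memberships; objective: alternative.


-- ===== PORT A =====
def parse_run_instruction (text : String) : List (String × Option String) :=
  let instruction : PySem.Dict String (Option String) :=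
    PySem.Dict.ofList [("type", some "unknown"), ("app", none), ("action", none), ("command", none)]
  let t := PySem.Str.lower text
  let instruction :=
    if PySem.Str.isIn "xcode" t || PySem.Str.isIn ".xcodeproj" t || PySem.Str.isIn "ios" t then
      let i := (instruction.insert "type" (some "xcode")).insert "app" (some "Xcode")
      if PySem.Str.isIn "build" t then i.insert "action" (some "build")
      else if PySem.Str.isIn "run" t || PySem.Str.isIn "execute" t then i.insert "action" (some "run")
      else i.insert "action" (some "run")
    else if PySem.Str.isIn "android" t || PySem.Str.isIn "gradle" t then
      let i := (instruction.insert "type" (some "android")).insert "app" (some "Android Studio")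
      if PySem.Str.isIn "build" t then i.insert "action" (some "build")
      else if PySem.Str.isIn "run" t then i.insert "action" (some "run")
      else i
    else if (["terminal", "command", "bash", "shell", "npm", "python", "node"]).any
              (fun w => PySem.Str.isIn w t) then
      let i := instruction.insert "type" (some "terminal")
      if PySem.Str.isIn "npm" t then i.insert "command" (some "npm start")
      else if PySem.Str.isIn "python" t || PySem.Str.isIn "python3" t then i.insert "command" (some "python3")
      else if PySem.Str.isIn "node" t then i.insert "command" (some "node")
      else i.insert "command" none
    else instruction
  instruction.items

-- ===== PORT B =====
def pvKeywords : List String :=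
  ["xcode", ".xcodeproj", "ios", "android", "gradle", "terminal", "command", "bash", "shell",
   "npm", "python", "node", "build", "run", "execute"]

-- Source B's sweep: for i in range(len(t)): for kw in _KEYWORDS: if t.startswith(kw, i): found.add(kw)
-- (startswith at offset 0 ≤ i < len t is exactly: kw is a prefix of drop i — PySem.Chars.startswith, exact)
def pvFoundKeywords (t : List Char) : PySem.Set String :=
  (List.range t.length).foldl
    (fun acc i => pvKeywords.foldl
      (fun acc kw =>
        if PySem.Chars.startswith (t.drop i) kw.toList then PySem.Set.add acc kw else acc)
      acc)
    PySem.Set.empty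

def parse_run_instruction_alt (text : String) : List (String × Option String) :=
  let t := PySem.Str.lower text
  let found := pvFoundKeywords t.toList
  let instruction : PySem.Dict String (Option String) :=
    PySem.Dict.ofList [("type", some "unknown"), ("app", none), ("action", none), ("command", none)]
  let instruction :=
    if (["xcode", ".xcodeproj", "ios"]).any (fun k => PySem.Set.contains found k) then
      ((instruction.insert "type" (some "xcode")).insert "app" (some "Xcode")).insert "action"
        (if PySem.Set.contains found "build" then some "build" else some "run")
    else if (["android", "gradle"]).any (fun k => PySem.Set.contains found k) then
      let i := (instruction.insert "type" (some "android")).insert "app" (some "Android Studio")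
      if PySem.Set.contains found "build" then i.insert "action" (some "build")
      else if PySem.Set.contains found "run" then i.insert "action" (some "run")
      else i
    else if (["terminal", "command", "bash", "shell", "npm", "python", "node"]).any
              (fun k => PySem.Set.contains found k) then
      (instruction.insert "type" (some "terminal")).insert "command"
        (if PySem.Set.contains found "npm" then some "npm start"
         else if PySem.Set.contains found "python" then some "python3"
         else if PySem.Set.contains found "node" then some "node"
         else none)
    else instruction
  instruction.items

-- ===== PRECONDITION & SPEC =====
def Spec_parse_run_instruction (text : String) (out : List (String × Option String)) : Prop := out = parse_run_instruction_alt text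
instance (text : String) (out : List (String × Option String)) : Decidable (Spec_parse_run_instruction text out) := by unfold Spec_parse_run_instruction; infer_instance

-- ===== CLAIM (what is proved, stated in full; the proofs are below) =====
def Claim_equal_parse_run_instruction : Prop := ∀ (text : String), Dom_parse_run_instruction text → Spec_parse_run_instruction text (parse_run_instruction text)

-- ===== LEMMAS AND PROOFS =====
-- membership in the inner keyword fold
lemma mem_inner_fold (p : String → Bool) (kws : List String) (acc : PySem.Set String) (x : String) :
    x ∈ kws.foldl (fun acc kw => if p kw then PySem.Set.add acc kw else acc) acc ↔
      x ∈ acc ∨ (x ∈ kws ∧ p x = true) := by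
  induction kws generalizing acc with
  | nil => simp
  | cons k ks ih =>
      simp only [List.foldl_cons, ih]
      by_cases hk : p k = true
      · simp [hk, PySem.Set.mem_add]
        constructor
        · rintro (⟨h | rfl⟩ | h)
          · exact Or.inl h
          · exact Or.inr ⟨Or.inl rfl, hk⟩
          · exact Or.inr ⟨Or.inr h.1, h.2⟩
        · rintro (h | ⟨rfl | h, hp⟩)
          · exact Or.inl (Or.inl h)
          · exact Or.inl (Or.inr rfl)
          · exact Or.inr ⟨h, hp⟩
      · simp only [hk]
        rw [Bool.not_eq_true] at hk
        constructor
        · rintro (h | h)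
          · exact Or.inl h
          · exact Or.inr ⟨List.mem_cons_of_mem _ h.1, h.2⟩
        · rintro (h | ⟨h, hp⟩)
          · exact Or.inl h
          · rcases List.mem_cons.1 h with rfl | h
            · exact absurd hp (by simp [hk])
            · exact Or.inr ⟨h, hp⟩

-- membership in the whole sweep
lemma mem_found (t : List Char) (x : String) :
    x ∈ pvFoundKeywords t ↔
      ∃ i < t.length, x ∈ pvKeywords ∧ PySem.Chars.startswith (t.drop i) x.toList = true := by
  unfold pvFoundKeywords
  have h : ∀ (idxs : List ℕ) (acc : PySem.Set String),
      x ∈ idxs.foldl (fun acc i => pvKeywords.foldl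
            (fun acc kw => if PySem.Chars.startswith (t.drop i) kw.toList
                           then PySem.Set.add acc kw else acc) acc) acc ↔
        x ∈ acc ∨ ∃ i ∈ idxs, x ∈ pvKeywords ∧
          PySem.Chars.startswith (t.drop i) x.toList = true := by
    intro idxs
    induction idxs with
    | nil => simp
    | cons j js ih =>
        intro acc
        simp only [List.foldl_cons, ih, mem_inner_fold]
        constructor
        · rintro ((h | h) | h)
          · exact Or.inl h
          · exact Or.inr ⟨j, List.mem_cons_self, h⟩
          · obtain ⟨i, hi, hh⟩ := h
            exact Or.inr ⟨i, List.mem_cons_of_mem _ hi, hh⟩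
        · rintro (h | ⟨i, hi, hh⟩)
          · exact Or.inl (Or.inl h)
          · rcases List.mem_cons.1 hi with rfl | hi
            · exact Or.inl (Or.inr hh)
            · exact Or.inr ⟨i, hi, hh⟩
  rw [h]
  simp [List.mem_range]

-- for every (nonempty) keyword of the table, membership in the sweep's set is exactly substring occurrence
lemma contains_found (t : List Char) (x : String) (hx : x ∈ pvKeywords) (hne : x.toList ≠ []) :
    PySem.Set.contains (pvFoundKeywords t) x = PySem.Chars.isIn x.toList t := by
  rcases hb : PySem.Chars.isIn x.toList t with _ | _
  · rw [Bool.eq_false_iff]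
    intro hcont
    obtain ⟨i, _, _, hsw⟩ := (mem_found t x).1 ((PySem.Set.contains_iff _ _).1 hcont)
    rw [PySem.Chars.startswith_iff] at hsw
    have := (PySem.Chars.exists_prefix_drop_iff_isIn _ _).1 ⟨i, hsw⟩
    rw [hb] at this
    exact Bool.false_ne_true this
  · apply (PySem.Set.contains_iff _ _).2
    rw [mem_found]
    obtain ⟨j, hpre⟩ := (PySem.Chars.exists_prefix_drop_iff_isIn _ _).2 hb
    have hj : j < t.length := by
      by_contra hge
      rw [not_lt] at hge
      rw [List.drop_eq_nil_of_le hge] at hpre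
      exact hne (List.prefix_nil.1 hpre)
    exact ⟨j, hj, hx, (PySem.Chars.startswith_iff _ _).2 hpre⟩

-- "python3" occurring forces "python" to occur (substring transitivity)
lemma isIn_python_of_python3 (t : String) (h : PySem.Str.isIn "python3" t = true) :
    PySem.Str.isIn "python" t = true := by
  rw [PySem.Str.isIn_iff_infix] at h ⊢
  exact List.IsInfix.trans (by decide) h

-- ===== VERDICT (by name: the statement is the Claim_ definition above) =====
theorem parse_run_instruction_spec : Claim_equal_parse_run_instruction := by
  intro text _
  unfold Spec_parse_run_instruction parse_run_instruction parse_run_instruction_alt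
  set t := PySem.Str.lower text with ht
  have hc : ∀ x : String, x ∈ pvKeywords → x.toList ≠ [] →
      PySem.Set.contains (pvFoundKeywords t.toList) x = PySem.Str.isIn x t := by
    intro x hx hne
    rw [contains_found t.toList x hx hne, PySem.Str.isIn_eq]
  simp only [List.any_cons, List.any_nil, Bool.or_false, Bool.or_assoc]
  rw [hc "xcode" (by decide) (by decide), hc ".xcodeproj" (by decide) (by decide),
      hc "ios" (by decide) (by decide), hc "android" (by decide) (by decide),
      hc "gradle" (by decide) (by decide), hc "terminal" (by decide) (by decide),
      hc "command" (by decide) (by decide), hc "bash" (by decide) (by decide),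
      hc "shell" (by decide) (by decide), hc "npm" (by decide) (by decide),
      hc "python" (by decide) (by decide), hc "node" (by decide) (by decide),
      hc "build" (by decide) (by decide), hc "run" (by decide) (by decide)]
  have hpy := isIn_python_of_python3 t
  by_cases h1 : (PySem.Str.isIn "xcode" t || (PySem.Str.isIn ".xcodeproj" t ||
      PySem.Str.isIn "ios" t)) = true
  · simp only [h1, if_true]
    generalize PySem.Str.isIn "build" t = b1
    generalize PySem.Str.isIn "run" t = b2
    generalize PySem.Str.isIn "execute" t = b3
    revert b1 b2 b3; decide
  · rw [if_neg h1, if_neg h1]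
    by_cases h2 : (PySem.Str.isIn "android" t || PySem.Str.isIn "gradle" t) = true
    · simp only [h2, if_true]
    · rw [if_neg h2, if_neg h2]
      by_cases h3 : (PySem.Str.isIn "terminal" t || (PySem.Str.isIn "command" t ||
          (PySem.Str.isIn "bash" t || (PySem.Str.isIn "shell" t || (PySem.Str.isIn "npm" t ||
          (PySem.Str.isIn "python" t || PySem.Str.isIn "node" t)))))) = true
      · simp only [h3, if_true]
        revert hpy
        generalize PySem.Str.isIn "python" t = b2
        generalize PySem.Str.isIn "python3" t = b3
        generalize PySem.Str.isIn "npm" t = b1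
        generalize PySem.Str.isIn "node" t = b4
        revert b1 b2 b3 b4; decide
      · rw [if_neg h3, if_neg h3]
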